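-- pv_equiv track=rewrite | github.com/mohitsudhakar/coding | codeforces/546A.py | func
-- ===== SOURCE A (Python) =====
-- def func(k, n, w):
--     if w <= 0:
--         return 0
--     s = 0
--     i = 1
--     while i <= w:
--         s += i*k
--         i += 1
--     if s <= n:
--         return 0
--     return s-n
-- ===== SOURCE B (Python) =====
-- def func(k, n, w):
--     if w <= 0:
--         return 0
--     s = k * w * (w + 1) // 2
--     return max(0, s - n)
-- ===== Notes on version B (the rewrite author's own statement) =====
-- stated objective: faster
-- what changed: Replaced the O(w) summation loop with the closed-form arithmetic-series formula k*w*(w+1)//2 and max(0, s-n).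
import Mathlib
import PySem

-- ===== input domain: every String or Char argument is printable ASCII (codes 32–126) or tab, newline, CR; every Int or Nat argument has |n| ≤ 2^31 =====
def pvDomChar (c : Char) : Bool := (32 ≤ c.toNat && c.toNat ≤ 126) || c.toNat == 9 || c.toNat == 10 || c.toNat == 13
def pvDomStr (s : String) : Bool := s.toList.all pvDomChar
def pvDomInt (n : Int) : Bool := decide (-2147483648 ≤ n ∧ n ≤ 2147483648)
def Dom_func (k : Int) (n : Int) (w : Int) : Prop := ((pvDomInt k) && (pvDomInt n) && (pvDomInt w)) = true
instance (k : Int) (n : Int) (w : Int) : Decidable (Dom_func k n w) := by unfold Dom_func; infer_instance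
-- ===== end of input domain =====

-- B replaces A's O(w) summation loop with the closed-form series k*w*(w+1)//2 (faster, asymptotic).

-- ===== PORT A =====
-- the 'while i <= w' loop, run for m = w.toNat iterations, carrying state (s, i)
def funcLoop (k : Int) : Nat → Int → Int → Int
  | 0, s, _ => s
  | m + 1, s, i => funcLoop k m (s + i * k) (i + 1)

def func (k : Int) (n : Int) (w : Int) : Int :=
  if w ≤ 0 then 0
  else
    let s := funcLoop k w.toNat 0 1
    if s ≤ n then 0 else s - n

-- ===== PORT B =====
def func_alt (k : Int) (n : Int) (w : Int) : Int :=
  if w ≤ 0 then 0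
  else
    let s := PySem.Int.floordiv (k * w * (w + 1)) 2
    max 0 (s - n)

-- ===== PRECONDITION & SPEC =====
def Spec_func (k : Int) (n : Int) (w : Int) (out : Int) : Prop := out = func_alt k n w
instance (k : Int) (n : Int) (w : Int) (out : Int) : Decidable (Spec_func k n w out) := by unfold Spec_func; infer_instance

-- ===== CLAIM (what is proved, stated in full; the proofs are below) =====
def Claim_equal_func : Prop := ∀ (k : Int) (n : Int) (w : Int), Dom_func k n w → Spec_func k n w (func k n w)

-- ===== LEMMAS AND PROOFS =====

-- invariant of A's loop: twice its result, in closed form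
theorem funcLoop_closed (k : Int) : ∀ (m : Nat) (s i : Int),
    2 * funcLoop k m s i = 2 * s + k * (2 * (m : Int) * i + (m : Int) * ((m : Int) - 1)) := by
  intro m
  induction m with
  | zero => intro s i; simp [funcLoop]
  | succ m ih =>
      intro s i
      rw [funcLoop, ih]
      push_cast
      ring

theorem funcLoop_sum (k w : Int) (hw : 0 < w) :
    funcLoop k w.toNat 0 1 = PySem.Int.floordiv (k * w * (w + 1)) 2 := by
  have h := funcLoop_closed k w.toNat 0 1
  have hc : ((w.toNat : Int)) = w := Int.toNat_of_nonneg (le_of_lt hw)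
  rw [hc] at h
  have h2 : 2 * funcLoop k w.toNat 0 1 = k * w * (w + 1) := by rw [h]; ring
  have : k * w * (w + 1) = 2 * funcLoop k w.toNat 0 1 := h2.symm
  rw [this]
  simp [PySem.Int.floordiv]
  try omega

-- ===== VERDICT (by name: the statement is the Claim_ definition above) =====
theorem func_spec : Claim_equal_func := by
  intro k n w _
  unfold Spec_func func func_alt
  by_cases hw : w ≤ 0
  · simp [hw]
  · have hw' : 0 < w := lt_of_not_ge hw
    simp only [if_neg hw]
    rw [funcLoop_sum k w hw']
    set s := PySem.Int.floordiv (k * w * (w + 1)) 2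
    by_cases hs : s ≤ n
    · simp [hs]; try omega
    · simp [hs]; try omega
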